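-- pv_equiv track=rewrite | github.com/shubham409/harwest-solutions | codeforces/1594/B.py | solve
-- ===== SOURCE A (Python) =====
-- mod = (10**9) +7
--
-- def solve(st,base):
--     start=0
--     ans=0
--     for i in st[::-1]:
--         if(i=='1'):
--             ans+= (base**start)%mod
--         start+=1
--     return ans%mod
-- ===== SOURCE B (Python) =====
-- mod = (10**9) +7
--
-- def solve(st, base):
--     # Horner pass, forward: no reversal, no explicit powers (alternative algorithm).
--     ans = 0
--     for ch in st:
--         ans = (ans * base + (1 if ch == '1' else 0)) % mod
--     return ans
-- ===== Notes on version B (the rewrite author's own statement) =====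
-- stated objective: alternative
-- what changed: Replaced the reversed scan that computes a full big-integer power base**start for every set bit with a single forward Horner pass keeping one reduced accumulator ans = (ans*base + bit) % mod.
import Mathlib
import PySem

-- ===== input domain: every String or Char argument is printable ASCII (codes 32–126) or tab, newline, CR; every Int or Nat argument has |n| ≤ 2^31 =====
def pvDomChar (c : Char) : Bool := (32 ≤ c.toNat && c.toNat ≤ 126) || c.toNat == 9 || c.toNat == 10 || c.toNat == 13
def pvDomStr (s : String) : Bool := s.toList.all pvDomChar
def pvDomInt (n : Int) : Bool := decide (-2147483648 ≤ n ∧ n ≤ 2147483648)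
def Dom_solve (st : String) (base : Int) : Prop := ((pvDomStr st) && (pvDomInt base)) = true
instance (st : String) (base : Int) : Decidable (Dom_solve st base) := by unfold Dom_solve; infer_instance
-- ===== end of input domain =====

-- B replaces A's reversed scan with per-bit big-int powers by one forward Horner pass
-- with a reduced accumulator (objective: alternative algorithm, same measured cost).

-- module constant: mod = 10**9 + 7
def pymod : Int := 10 ^ 9 + 7

-- ===== PORT A =====
-- loop body of A: state (start, ans); 'if i == '1': ans += (base**start) % mod; start += 1'
def solveStepA (base : Int) (p : Nat × Int) (i : Char) : Nat × Int :=
  (p.1 + 1, if i = '1' then p.2 + PySem.Int.mod (base ^ p.1) pymod else p.2)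

-- 'for i in st[::-1]' : st[::-1] is the reversed string, so we fold over st.toList.reverse
def solve (st : String) (base : Int) : Int :=
  PySem.Int.mod ((st.toList.reverse.foldl (solveStepA base) (0, 0)).2) pymod

-- ===== PORT B =====
-- loop body of B: 'ans = (ans * base + (1 if ch == '1' else 0)) % mod'
def solveStepB (base : Int) (ans : Int) (ch : Char) : Int :=
  PySem.Int.mod (ans * base + (if ch = '1' then 1 else 0)) pymod

def solve_alt (st : String) (base : Int) : Int :=
  st.toList.foldl (solveStepB base) 0

-- ===== PRECONDITION & SPEC =====
def Spec_solve (st : String) (base : Int) (out : Int) : Prop := out = solve_alt st base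
instance (st : String) (base : Int) (out : Int) : Decidable (Spec_solve st base out) := by unfold Spec_solve; infer_instance

-- ===== CLAIM (what is proved, stated in full; the proofs are below) =====
def Claim_equal_solve : Prop := ∀ (st : String) (base : Int), Dom_solve st base → Spec_solve st base (solve st base)

-- ===== LEMMAS AND PROOFS =====

-- the exact (unreduced) binary value of a list of chars, least-significant char FIRST
def bval (base : Int) : List Char → Int
  | [] => 0
  | c :: t => (if c = '1' then 1 else 0) + base * bval base t

theorem pymod_pos : (0:Int) < pymod := by norm_num [pymod]

theorem mod_is_emod (a : Int) : PySem.Int.mod a pymod = a % pymod :=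
  PySem.Int.mod_eq_emod_of_pos pymod_pos

-- modular congruence helpers
theorem emod_mul_add (x y z m : Int) : (x % m * y + z) % m = (x * y + z) % m := by
  rw [Int.add_emod, Int.mul_emod, Int.emod_emod_of_dvd x dvd_rfl, ← Int.mul_emod, ← Int.add_emod]

theorem emod_add_mid (a b c m : Int) : (a + b % m + c) % m = (a + b + c) % m := by
  have h := emod_mul_add b 1 (a + c) m
  simpa [mul_one, add_comm, add_left_comm, add_assoc] using h

-- bval over an appended last (most significant) char
theorem bval_append (base : Int) (l : List Char) (c : Char) :
    bval base (l ++ [c]) = bval base l + (if c = '1' then 1 else 0) * base ^ l.length := by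
  induction l with
  | nil => simp [bval]
  | cons h t ih =>
    simp [bval, ih, pow_succ]
    split_ifs <;> ring

-- invariant of A's loop: the accumulated sum is congruent to ans + base^start * bval l
theorem loopA_inv (base : Int) (l : List Char) (start : Nat) (ans : Int) :
    (l.foldl (solveStepA base) (start, ans)).2 % pymod
      = (ans + base ^ start * bval base l) % pymod := by
  induction l generalizing start ans with
  | nil => simp [bval]
  | cons c t ih =>
    simp only [List.foldl, solveStepA, bval]
    rcases Decidable.em (c = '1') with h | h
    · simp only [h, ih, mod_is_emod]
      have := emod_add_mid ans (base ^ start) (base ^ (start + 1) * bval base t) pymod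
      calc (ans + base ^ start % pymod + base ^ (start + 1) * bval base t) % pymod
          = (ans + base ^ start + base ^ (start + 1) * bval base t) % pymod := this
        _ = (ans + base ^ start * ((1:Int) + base * bval base t)) % pymod := by
              rw [pow_succ]; ring_nf
    · simp only [if_neg h, ih]
      rw [pow_succ]; ring_nf

-- invariant of B's Horner loop: the accumulator stays reduced, argue about its preimage x
theorem loopB_inv (base : Int) (l : List Char) (x : Int) :
    l.foldl (solveStepB base) (x % pymod)
      = (x * base ^ l.length + bval base l.reverse) % pymod := by
  induction l generalizing x with
  | nil => simp [bval]
  | cons c t ih =>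
    simp only [List.foldl, solveStepB, mod_is_emod, List.reverse_cons, List.length_cons]
    rw [emod_mul_add, ih, bval_append]
    congr 1
    simp [pow_succ]
    split_ifs <;> ring

-- ===== VERDICT (by name: the statement is the Claim_ definition above) =====
theorem solve_spec : Claim_equal_solve := by
  intro st base _
  unfold Spec_solve solve solve_alt
  rw [mod_is_emod, loopA_inv]
  have h0 : (0:Int) = 0 % pymod := by decide
  rw [h0, loopB_inv]
  simp
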